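-- pv_equiv track=rewrite | github.com/SandersNeo/AISecurity | strike/evasion/payload_mutator.py | kolmogorov_maximize
-- ===== SOURCE A (Python) =====
-- def kolmogorov_maximize(payload: str) -> str:
--     """
--     Kolmogorov complexity maximization.
--
--     Make payload incompressible by adding seemingly random but valid data.
--     High Kolmogorov complexity = hard to detect patterns.
--     """
--     # Use digits of pi for pseudo-random but deterministic data
--     pi_digits = "14159265358979323846264338327950288419716939937510"
--
--     result = []
--     pi_idx = 0
--
--     for i, c in enumerate(payload):
--         result.append(c)
--
--         # Add pi-based noise periodically
--         if i % 5 == 0 and pi_idx < len(pi_digits):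
--             noise = f'/*{pi_digits[pi_idx]}*/'
--             result.append(noise)
--             pi_idx += 1
--
--     return ''.join(result)
-- ===== SOURCE B (Python) =====
-- def kolmogorov_maximize(payload: str) -> str:
--     """Chunked rewrite: walk the payload in 5-character chunks; the pi digit
--     index is simply the chunk index, so no running counter is needed."""
--     pi_digits = "14159265358979323846264338327950288419716939937510"
--     parts = []
--     for g in range((len(payload) + 4) // 5):
--         chunk = payload[5 * g : 5 * g + 5]
--         parts.append(chunk[0])
--         if g < len(pi_digits):
--             parts.append('/*' + pi_digits[g] + '*/')
--         parts.append(chunk[1:])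
--     return ''.join(parts)
-- ===== Notes on version B (the rewrite author's own statement) =====
-- stated objective: alternative
-- what changed: Replaced the char-by-char loop with a modulo test and a running pi-digit counter by a loop over 5-character chunks whose chunk index is itself the pi-digit index: each iteration emits the chunk head, the optional comment noise for that chunk, then the rest of the chunk.
import Mathlib
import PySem

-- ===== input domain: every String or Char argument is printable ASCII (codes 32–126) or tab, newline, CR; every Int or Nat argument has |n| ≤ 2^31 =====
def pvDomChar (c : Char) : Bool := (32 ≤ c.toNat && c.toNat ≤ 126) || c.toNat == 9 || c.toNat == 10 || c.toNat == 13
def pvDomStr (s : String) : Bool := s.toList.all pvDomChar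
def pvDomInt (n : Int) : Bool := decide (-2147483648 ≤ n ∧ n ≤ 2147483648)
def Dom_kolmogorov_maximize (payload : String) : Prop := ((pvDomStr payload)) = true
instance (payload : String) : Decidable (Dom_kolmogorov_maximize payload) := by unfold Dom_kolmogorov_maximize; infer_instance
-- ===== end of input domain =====

-- B re-implements the char-by-char loop with a running pi counter as a loop over
-- 5-character chunks whose chunk index IS the pi-digit index (objective: simpler decomposition).

-- ===== PORT A =====
-- pi_digits = "14159265358979323846264338327950288419716939937510"
def piDigs : List Char :=
  ['1','4','1','5','9','2','6','5','3','5','8','9','7','9','3','2','3','8','4','6',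
   '2','6','4','3','3','8','3','2','7','9','5','0','2','8','8','4','1','9','7','1',
   '6','9','3','9','9','3','7','5','1','0']

-- loop body of A: result.append(c); if i % 5 == 0 and pi_idx < len(pi_digits): result.append('/*d*/'); pi_idx += 1
def kmStep (st : List Char × Int) (p : Int × Char) : List Char × Int :=
  let res := st.1 ++ [p.2]
  if PySem.Int.mod p.1 5 = 0 ∧ st.2 < PySem.List.len piDigs then
    (res ++ ['/', '*', PySem.List.pyGetD piDigs st.2 ' ', '*', '/'], st.2 + 1)
  else (res, st.2)

def kolmogorov_maximize (payload : String) : String :=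
  String.ofList ((PySem.List.enumerate payload.toList 0).foldl kmStep ([], 0)).1

-- ===== PORT B =====
-- one iteration of Source B's loop: chunk = payload[5g:5g+5]; chunk[0], optional '/*pi_digits[g]*/', chunk[1:]
def kmChunk (cs : List Char) (g : Int) : List Char :=
  let chunk := PySem.List.slice cs (some (5 * g)) (some (5 * g + 5))
  [PySem.List.pyGetD chunk 0 ' ']
    ++ (if g < PySem.List.len piDigs then ['/', '*', PySem.List.pyGetD piDigs g ' ', '*', '/'] else [])
    ++ PySem.List.slice chunk (some 1) none

def kolmogorov_maximize_alt (payload : String) : String :=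
  let cs := payload.toList
  let n := PySem.Int.floordiv (PySem.List.len cs + 4) 5
  String.ofList ((PySem.List.pyRange 0 n 1).foldl (fun acc g => acc ++ kmChunk cs g) [])

-- ===== PRECONDITION & SPEC =====
def Spec_kolmogorov_maximize (payload : String) (out : String) : Prop := out = kolmogorov_maximize_alt payload
instance (payload : String) (out : String) : Decidable (Spec_kolmogorov_maximize payload out) := by unfold Spec_kolmogorov_maximize; infer_instance

-- ===== CLAIM (what is proved, stated in full; the proofs are below) =====
def Claim_equal_kolmogorov_maximize : Prop := ∀ (payload : String), Dom_kolmogorov_maximize payload → Spec_kolmogorov_maximize payload (kolmogorov_maximize payload)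

-- ===== LEMMAS AND PROOFS =====

-- noise block for chunk index g
def noiseL (g : Nat) : List Char := ['/', '*', piDigs.getD g ' ', '*', '/']

-- common shape both ports are reduced to: the output for the suffix of the payload starting at chunk g
def bChunks : List Char → Nat → List Char
  | [], _ => []
  | c :: rest, g =>
      c :: ((if g < 50 then noiseL g else []) ++ (rest.take 4 ++ bChunks (rest.drop 4) (g + 1)))
termination_by cs => cs.length
decreasing_by simp [List.length_drop]

lemma piDigs_len : PySem.List.len piDigs = 50 := by decide

lemma bChunks_nil (g : Nat) : bChunks [] g = [] := by rw [bChunks]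

lemma bChunks_cons (c : Char) (rest : List Char) (g : Nat) :
    bChunks (c :: rest) g
      = c :: ((if g < 50 then noiseL g else []) ++ (rest.take 4 ++ bChunks (rest.drop 4) (g + 1))) := by
  rw [bChunks]

-- folding kmStep over positions none of which is ≡ 0 (mod 5) just appends the characters
lemma km_noMod (r : List Char) : ∀ (j : Int) (st : List Char × Int),
    (∀ k : Nat, k < r.length → ¬ (5:Int) ∣ (j + k)) →
    (PySem.List.enumerate r j).foldl kmStep st = (st.1 ++ r, st.2) := by
  induction r with
  | nil => intro j st _; simp [PySem.List.enumerate_nil]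
  | cons c rest ih =>
      intro j st h
      have h0 : ¬ (5:Int) ∣ j := by simpa using h 0 (by simp)
      rw [PySem.List.enumerate_cons]
      simp only [List.foldl_cons]
      have hstep : kmStep st (j, c) = (st.1 ++ [c], st.2) := by
        simp [kmStep, h0]
      rw [hstep, ih (j + 1) (st.1 ++ [c], st.2) ?_]
      · simp
      · intro k hk hc
        have e : j + ((k + 1 : Nat) : Int) = j + 1 + (k : Int) := by push_cast; ring
        exact h (k + 1) (by simpa using Nat.succ_lt_succ hk) (by rw [e]; exact hc)

lemma A_main (n : Nat) : ∀ (cs : List Char), cs.length = n → ∀ (g : Nat) (acc : List Char),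
    ((PySem.List.enumerate cs (5 * (g : Int))).foldl kmStep (acc, ((min g 50 : Nat) : Int))).1
      = acc ++ bChunks cs g := by
  induction n using Nat.strong_induction_on with
  | _ n ih =>
    intro cs hlen g acc
    match cs with
    | [] => rw [PySem.List.enumerate_nil, bChunks_nil]; simp
    | c :: rest =>
      have hrl : rest.length + 1 = n := by simpa using hlen
      rw [PySem.List.enumerate_cons]
      simp only [List.foldl_cons]
      -- first element: index 5g is divisible by 5
      have hdvd : PySem.Int.mod (5 * (g : Int)) 5 = 0 := by
        rw [PySem.Int.mod_eq_zero_iff_dvd]; exact ⟨g, by ring⟩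
      have hstep : kmStep (acc, ((min g 50 : Nat) : Int)) (5 * (g : Int), c)
          = (acc ++ [c] ++ (if g < 50 then noiseL g else []), ((min (g + 1) 50 : Nat) : Int)) := by
        by_cases hg : g < 50
        · have hmin : min g 50 = g := by omega
          have hmin' : min (g + 1) 50 = g + 1 := by omega
          have hg' : ((min g 50 : Nat) : Int) < PySem.List.len piDigs := by
            rw [piDigs_len, hmin]; exact_mod_cast hg
          simp only [kmStep, hmin, hmin', if_pos hg, noiseL]
          refine Prod.ext ?_ ?_ <;> simp [show piDigs.length = 50 from by decide, hg]
        · have hmin : min g 50 = 50 := by omega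
          have hmin' : min (g + 1) 50 = 50 := by omega
          have hg' : ¬ (PySem.Int.mod (5 * (g : Int)) 5 = 0 ∧ ((min g 50 : Nat) : Int) < PySem.List.len piDigs) := by
            rw [piDigs_len, hmin]; intro hcc; exact absurd hcc.2 (by norm_num)
          simp only [kmStep, hmin, hmin', if_neg hg]
          simp [show piDigs.length = 50 from by decide]
      rw [hstep]
      rw [bChunks_cons]
      -- split the remaining characters into this chunk's tail (4 chars) and the rest
      conv_lhs => rw [show rest = rest.take 4 ++ rest.drop 4 from (List.take_append_drop 4 rest).symm]
      rw [PySem.List.enumerate_append, List.foldl_append]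
      rw [km_noMod (rest.take 4) (5 * (g : Int) + 1) _ ?_]
      · by_cases hlong : 4 ≤ rest.length
        · have ht4 : (rest.take 4).length = 4 := by simp [hlong]
          rw [ht4]
          have hidx : 5 * (g : Int) + 1 + (4 : Nat) = 5 * ((g + 1 : Nat) : Int) := by push_cast; ring
          rw [hidx, ih (rest.drop 4).length (by simp; omega) (rest.drop 4) rfl (g + 1)]
          simp [List.append_assoc]
        · have hd4 : rest.drop 4 = [] := List.drop_eq_nil_of_le (by omega)
          rw [hd4, PySem.List.enumerate_nil]
          rw [bChunks_nil]
          simp [List.take_of_length_le (by omega : rest.length ≤ 4), List.append_assoc]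
      · intro k hk
        have hk4 : k < 4 := lt_of_lt_of_le hk (by simp)
        intro hc
        obtain ⟨t, ht⟩ := hc
        have hk4' : (k : Int) < 4 := by exact_mod_cast hk4
        omega

lemma B_main (cs : List Char) : ∀ (m g : Nat),
    (g : Int) + m = PySem.Int.floordiv ((cs.length : Int) + 4) 5 →
    (PySem.List.pyRange g (PySem.Int.floordiv ((cs.length : Int) + 4) 5) 1).flatMap (kmChunk cs)
      = bChunks (cs.drop (5 * g)) g := by
  have hfd : PySem.Int.floordiv ((cs.length : Int) + 4) 5
      = (((cs.length + 4) / 5 : Nat) : Int) := by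
    rw [show ((cs.length : Int) + 4) = ((cs.length + 4 : Nat) : Int) by push_cast; ring]
    exact_mod_cast PySem.Int.floordiv_natCast (cs.length + 4) 5
  intro m
  induction m with
  | zero =>
      intro g hg
      rw [hfd] at hg ⊢
      have hgn : g = (cs.length + 4) / 5 := by omega
      have hdrop : cs.drop (5 * g) = [] := List.drop_eq_nil_of_le (by omega)
      rw [hdrop, bChunks_nil, PySem.List.pyRange_one]
      subst hgn
      simp
  | succ m ihm =>
      intro g hg
      have hlt : (g : Int) < PySem.Int.floordiv ((cs.length : Int) + 4) 5 := by
        rw [hfd] at hg ⊢; push_cast at hg ⊢; omega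
      have h5g : 5 * g < cs.length := by
        rw [hfd] at hg
        have : (g : Int) + ((m : Int) + 1) = (((cs.length + 4) / 5 : Nat) : Int) := by push_cast at hg ⊢; omega
        have := (by exact_mod_cast this : g + (m + 1) = (cs.length + 4) / 5)
        omega
      rw [PySem.List.pyRange_one_cons hlt]
      rw [List.flatMap_cons]
      have hcons : ∃ c rest', cs.drop (5 * g) = c :: rest' := by
        cases hd : cs.drop (5 * g) with
        | nil => exfalso; have := congrArg List.length hd; simp at this; omega
        | cons c r => exact ⟨c, r, rfl⟩
      obtain ⟨c, rest', hd⟩ := hcons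
      -- evaluate kmChunk cs g
      have hchunk : PySem.List.slice cs (some (5 * (g : Int))) (some (5 * (g : Int) + 5))
          = c :: rest'.take 4 := by
        rw [PySem.List.slice_toNat cs (by positivity) (by positivity)]
        rw [show (5 * (g : Int)).toNat = 5 * g by omega,
            show (5 * (g : Int) + 5).toNat = 5 * g + 5 by omega,
            show 5 * g + 5 - 5 * g = 5 by omega, hd]
        rfl
      have hkm : kmChunk cs (g : Int)
          = c :: ((if g < 50 then noiseL g else []) ++ rest'.take 4) := by
        unfold kmChunk
        rw [hchunk]
        by_cases hg50 : g < 50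
        · simp [show piDigs.length = 50 from by decide, hg50, noiseL,
            PySem.List.slice_from_one, PySem.List.pyGetD_zero_cons]
        · simp [show piDigs.length = 50 from by decide, hg50,
            PySem.List.slice_from_one, PySem.List.pyGetD_zero_cons]
      rw [hkm]
      have hih := ihm (g + 1) (by push_cast at hg ⊢; omega)
      rw [show ((g : Nat) : Int) + 1 = ((g + 1 : Nat) : Int) by push_cast; ring, hih]
      have hdd : cs.drop (5 * (g + 1)) = rest'.drop 4 := by
        rw [show 5 * (g + 1) = 5 * g + 5 by ring, ← List.drop_drop, hd]
        rfl
      rw [hdd, hd]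
      rw [bChunks_cons]
      simp [List.append_assoc]

-- ===== VERDICT (by name: the statement is the Claim_ definition above) =====
theorem kolmogorov_maximize_spec : Claim_equal_kolmogorov_maximize := by
  intro payload _
  unfold Spec_kolmogorov_maximize kolmogorov_maximize kolmogorov_maximize_alt
  congr 1
  have hA := A_main payload.toList.length payload.toList rfl 0 []
  simp only [Nat.cast_zero, mul_zero] at hA
  rw [show ((min 0 50 : Nat) : Int) = 0 by norm_num] at hA
  rw [hA]
  rw [PySem.List.foldl_append_eq_flatMap]
  have hB := B_main payload.toList ((payload.toList.length + 4) / 5) 0 ?_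
  · simp only [Nat.cast_zero, mul_zero, List.drop_zero] at hB
    rw [PySem.List.len_eq]
    simpa using hB.symm
  · have h := PySem.Int.floordiv_natCast (payload.toList.length + 4) 5
    push_cast at h ⊢
    omega
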